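-- pv_equiv track=rewrite | github.com/mepex/advent_of_code_2023 | 2023/Day12/main.py | eval_line
-- ===== SOURCE A (Python) =====
-- def eval_line(m):
--     n = []
--     last = False
--     i = 0
--     for c in m:
--         if c == "#":
--             i += 1
--         elif c == ".":
--             if i > 0:
--                 n.append(i)
--                 i = 0
--         else:
--             return None
--     if i > 0:
--         n.append(i)
--     return n
-- ===== SOURCE B (Python) =====
-- def eval_line(m):
--     if any(c not in "#." for c in m):
--         return None
--     return [len(run) for run in m.split(".") if run]
-- ===== Notes on version B (the rewrite author's own statement) =====
-- stated objective: simpler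
-- what changed: Replaces the manual character loop with a running counter by a validity scan followed by splitting on '.' and measuring the non-empty pieces.
import Mathlib
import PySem

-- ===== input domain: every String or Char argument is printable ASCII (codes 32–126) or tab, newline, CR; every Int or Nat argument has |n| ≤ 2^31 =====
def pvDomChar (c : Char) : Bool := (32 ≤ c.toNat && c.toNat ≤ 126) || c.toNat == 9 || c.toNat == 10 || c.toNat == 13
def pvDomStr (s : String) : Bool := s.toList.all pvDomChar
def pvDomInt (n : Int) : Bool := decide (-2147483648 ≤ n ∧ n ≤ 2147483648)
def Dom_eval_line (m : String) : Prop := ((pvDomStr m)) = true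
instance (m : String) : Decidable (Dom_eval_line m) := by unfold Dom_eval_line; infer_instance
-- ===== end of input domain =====

-- B replaces A's manual counter loop by validate-then-split-on-'.': simpler decomposition, same cost.

-- ===== PORT A =====
-- the loop of A, with the running list n and counter i as state; early 'return None' = none
def evalLineLoop : List Char → List Int → Int → Option (List Int)
  | [], n, i => some (if i > 0 then n ++ [i] else n)
  | c :: cs, n, i =>
    if c == '#' then evalLineLoop cs n (i + 1)
    else if c == '.' then
      (if i > 0 then evalLineLoop cs (n ++ [i]) 0 else evalLineLoop cs n i)
    else none

def eval_line (m : String) : Option (List Int) := evalLineLoop m.toList [] 0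

-- ===== PORT B =====
def eval_line_alt (m : String) : Option (List Int) :=
  if m.toList.any (fun c => !(c == '#' || c == '.')) then none
  else some (((PySem.Chars.splitOn m.toList ['.']).filter (fun r => !r.isEmpty)).map
      (fun r => (r.length : Int)))

-- ===== PRECONDITION & SPEC =====
def Spec_eval_line (m : String) (out : Option (List Int)) : Prop := out = eval_line_alt m
instance (m : String) (out : Option (List Int)) : Decidable (Spec_eval_line m out) := by unfold Spec_eval_line; infer_instance

-- ===== CLAIM (what is proved, stated in full; the proofs are below) =====
def Claim_equal_eval_line : Prop := ∀ (m : String), Dom_eval_line m → Spec_eval_line m (eval_line m)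

-- ===== LEMMAS AND PROOFS =====

-- structural characterisation of splitting a char list on '.'
def spDot : List Char → List Char → List (List Char)
  | [], cur => [cur.reverse]
  | c :: rest, cur =>
    if c == '.' then cur.reverse :: spDot rest [] else spDot rest (c :: cur)

theorem splitOn_go_eq (fuel : Nat) : ∀ (l cur : List Char) (acc : List (List Char)),
    l.length < fuel →
    PySem.Chars.splitOn.go ['.'] fuel l cur acc = acc.reverse ++ spDot l cur := by
  induction fuel with
  | zero => intro l cur acc h; omega
  | succ fuel ih =>
    intro l cur acc h
    cases l with
    | nil => simp [PySem.Chars.splitOn.go, spDot]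
    | cons c rest =>
      simp only [List.length_cons] at h
      by_cases hc : c = '.'
      · subst hc
        have hp : List.isPrefixOf ['.'] ('.' :: rest) = true := by
          simp [List.isPrefixOf]
        rw [PySem.Chars.splitOn.go, if_pos hp]
        have hd : List.drop (['.'] : List Char).length ('.' :: rest) = rest := by simp
        rw [hd, ih rest [] _ (by omega)]
        simp [spDot]
      · have hp : List.isPrefixOf ['.'] (c :: rest) = false := by
          simp [List.isPrefixOf]
          exact fun h => absurd h.symm hc
        rw [PySem.Chars.splitOn.go, if_neg (by simp [hp])]
        rw [ih rest (c :: cur) acc (by omega)]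
        simp [spDot, hc]

theorem splitOn_eq_spDot (l : List Char) :
    PySem.Chars.splitOn l ['.'] = spDot l [] := by
  have := splitOn_go_eq (l.length + 1) l [] [] (by omega)
  simpa [PySem.Chars.splitOn] using this

theorem evalLineLoop_valid : ∀ (l : List Char), (∀ c ∈ l, c = '#' ∨ c = '.') →
    ∀ (cur : List Char) (n : List Int),
    evalLineLoop l n (cur.length : Int) =
      some (n ++ ((spDot l cur).filter (fun r => !r.isEmpty)).map (fun r => (r.length : Int))) := by
  intro l
  induction l with
  | nil =>
    intro _ cur n
    cases cur with
    | nil => simp [evalLineLoop, spDot]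
    | cons a as =>
      have hpos : (0 : Int) < (((a :: as) : List Char).length : Int) := by
        simp
      simp [evalLineLoop, spDot]
  | cons c rest ih =>
    intro hv cur n
    have hrest : ∀ c ∈ rest, c = '#' ∨ c = '.' := fun x hx => hv x (List.mem_cons_of_mem _ hx)
    rcases hv c (List.mem_cons_self) with hc | hc
    · subst hc
      have h1 : ((cur.length : Int) + 1) = ((('#' :: cur).length : Int)) := by
        push_cast [List.length_cons]
        ring
      simp only [evalLineLoop, beq_self_eq_true, if_true, h1]
      rw [ih hrest ('#' :: cur) n]
      simp [spDot]
    · subst hc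
      have hne : (('.' : Char) == '#') = false := by decide
      simp only [evalLineLoop, hne, Bool.false_eq_true, if_false, beq_self_eq_true, if_true]
      cases cur with
      | nil =>
        rw [if_neg (by simp)]
        rw [show (((([] : List Char)).length : Int)) = ((([] : List Char).length : Int)) from rfl,
            ih hrest [] n]
        simp [spDot]
      | cons a as =>
        have hpos : (0 : Int) < (((a :: as) : List Char).length : Int) := by simp
        rw [if_pos hpos]
        rw [show (0 : Int) = ((([] : List Char).length : Int)) by simp,
            ih hrest [] (n ++ [(((a :: as) : List Char).length : Int)])]
        simp [spDot]

theorem evalLineLoop_invalid : ∀ (l : List Char) (n : List Int) (i : Int),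
    (∃ c ∈ l, c ≠ '#' ∧ c ≠ '.') → evalLineLoop l n i = none := by
  intro l
  induction l with
  | nil =>
    intro n i h
    rcases h with ⟨c, hc, _⟩
    simp at hc
  | cons c rest ih =>
    intro n i h
    by_cases h1 : c = '#'
    · subst h1
      have hr : ∃ c ∈ rest, c ≠ '#' ∧ c ≠ '.' := by
        rcases h with ⟨c0, hc0, hne⟩
        rcases List.mem_cons.mp hc0 with h2 | h2
        · exact absurd h2 hne.1
        · exact ⟨c0, h2, hne⟩
      simp only [evalLineLoop, beq_self_eq_true, if_true]
      exact ih n _ hr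
    · by_cases h2 : c = '.'
      · subst h2
        have hr : ∃ c ∈ rest, c ≠ '#' ∧ c ≠ '.' := by
          rcases h with ⟨c0, hc0, hne⟩
          rcases List.mem_cons.mp hc0 with h3 | h3
          · exact absurd h3 hne.2
          · exact ⟨c0, h3, hne⟩
        have hne : (('.' : Char) == '#') = false := by decide
        simp only [evalLineLoop, hne, Bool.false_eq_true, if_false, beq_self_eq_true, if_true]
        split
        · exact ih _ _ hr
        · exact ih _ _ hr
      · have b1 : (c == '#') = false := by simpa using h1
        have b2 : (c == '.') = false := by simpa using h2
        simp [evalLineLoop, b1, b2]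

-- ===== VERDICT (by name: the statement is the Claim_ definition above) =====
theorem eval_line_spec : Claim_equal_eval_line := by
  intro m _
  unfold Spec_eval_line eval_line eval_line_alt
  by_cases hv : ∀ c ∈ m.toList, c = '#' ∨ c = '.'
  · have hany : (m.toList.any (fun c => !(c == '#' || c == '.'))) = false := by
      simp only [List.any_eq_false]
      intro c hc
      rcases hv c hc with h | h <;> simp [h]
    rw [if_neg (by rw [hany]; simp)]
    rw [splitOn_eq_spDot]
    have := evalLineLoop_valid m.toList hv [] []
    simpa using this
  · have hex : ∃ c ∈ m.toList, c ≠ '#' ∧ c ≠ '.' := by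
      rcases not_forall.mp hv with ⟨c, hc⟩
      rcases _root_.not_imp.mp hc with ⟨hmem, hne⟩
      exact ⟨c, hmem, not_or.mp hne⟩
    have hany : (m.toList.any (fun c => !(c == '#' || c == '.'))) = true := by
      rw [List.any_eq_true]
      rcases hex with ⟨c, hc, hne⟩
      exact ⟨c, hc, by simp [hne.1, hne.2]⟩
    rw [if_pos hany, evalLineLoop_invalid m.toList [] 0 hex]
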